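-- pv_equiv track=rewrite | github.com/mhammadgammal/DSP_Tasks | DSP Tasks/task9.py | truncate_signal
-- ===== SOURCE A (Python) =====
-- def truncate_signal(N):
--     list_1 = []
--     list_2 = []
--     for i in range((N / 2).__ceil__()):
--         list_1.append(i)
--         list_2.append(-i)
--     indicates = list_1 + list_2
--     indicates = list(set(indicates))
--     indicates.sort()
--     return indicates
-- ===== SOURCE B (Python) =====
-- def truncate_signal(N):
--     m = (N + 1) // 2  # ceil(N/2)
--     return list(range(1 - m, m))
-- ===== Notes on version B (the rewrite author's own statement) =====
-- stated objective: faster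
-- what changed: B computes m = ceil(N/2) arithmetically and emits range(1-m, m) directly, replacing A's two appended lists, set deduplication and sort.
import Mathlib
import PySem

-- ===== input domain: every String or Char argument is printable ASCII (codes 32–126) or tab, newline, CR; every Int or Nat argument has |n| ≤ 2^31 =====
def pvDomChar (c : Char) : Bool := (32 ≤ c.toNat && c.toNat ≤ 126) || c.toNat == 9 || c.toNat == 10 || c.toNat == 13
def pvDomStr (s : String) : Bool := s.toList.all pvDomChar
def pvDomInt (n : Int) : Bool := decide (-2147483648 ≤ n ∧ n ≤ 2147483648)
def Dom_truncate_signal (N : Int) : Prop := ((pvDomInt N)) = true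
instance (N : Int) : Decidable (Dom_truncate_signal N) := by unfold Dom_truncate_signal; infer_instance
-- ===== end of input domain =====

-- B replaces A's append-loop + set + sort by the closed-form range(1-ceil(N/2), ceil(N/2)); measurably faster (asymptotic).

-- ===== PORT A =====
-- (N / 2).__ceil__() ported as (N+1)//2, exact for the |N| ≤ 2^31 domain (halves are exact floats there)
def truncate_signal (N : Int) : List Int :=
  let m := PySem.Int.floordiv (N + 1) 2
  let p := (PySem.List.pyRange 0 m 1).foldl
             (fun (p : List Int × List Int) i => (p.1 ++ [i], p.2 ++ [-i])) ([], [])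
  let indicates := p.1 ++ p.2
  let indicates := PySem.Set.ofList indicates
  PySem.List.sorted indicates (fun x => x) false

-- ===== PORT B =====
def truncate_signal_alt (N : Int) : List Int :=
  let m := PySem.Int.floordiv (N + 1) 2
  PySem.List.pyRange (1 - m) m 1

-- ===== PRECONDITION & SPEC =====
def Spec_truncate_signal (N : Int) (out : List Int) : Prop := out = truncate_signal_alt N
instance (N : Int) (out : List Int) : Decidable (Spec_truncate_signal N out) := by unfold Spec_truncate_signal; infer_instance

-- ===== CLAIM (what is proved, stated in full; the proofs are below) =====
def Claim_equal_truncate_signal : Prop := ∀ (N : Int), Dom_truncate_signal N → Spec_truncate_signal N (truncate_signal N)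

-- ===== LEMMAS AND PROOFS =====

-- A's loop appends i to list_1 and -i to list_2, step for step
theorem pv_foldl_pair (L : List Int) (a b : List Int) :
    L.foldl (fun (p : List Int × List Int) i => (p.1 ++ [i], p.2 ++ [-i])) (a, b)
      = (a ++ L, b ++ L.map (fun i => -i)) := by
  induction L generalizing a b with
  | nil => simp
  | cons x t ih => simp [List.foldl, ih]

theorem pv_mem_union (m x : Int) :
    x ∈ PySem.List.pyRange (1 - m) m 1 ↔
      x ∈ PySem.List.pyRange 0 m 1 ++ (PySem.List.pyRange 0 m 1).map (fun i => -i) := by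
  simp only [List.mem_append, List.mem_map, PySem.List.mem_pyRange_one]
  constructor
  · intro ⟨h1, h2⟩
    by_cases hx : 0 ≤ x
    · exact Or.inl ⟨hx, h2⟩
    · exact Or.inr ⟨-x, ⟨by omega, by omega⟩, by omega⟩
  · rintro (⟨h1, h2⟩ | ⟨i, ⟨h1, h2⟩, rfl⟩) <;> omega

-- ===== VERDICT (by name: the statement is the Claim_ definition above) =====
theorem truncate_signal_spec : Claim_equal_truncate_signal := by
  intro N _
  unfold Spec_truncate_signal truncate_signal truncate_signal_alt
  set m := PySem.Int.floordiv (N + 1) 2 with hm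
  simp only [pv_foldl_pair, List.nil_append]
  apply PySem.List.sorted_eq_of_perm_of_pairwise_lt
  · rw [List.perm_ext_iff_of_nodup (PySem.List.nodup_pyRange_one _ _) (PySem.Set.nodup_ofList _)]
    intro x
    rw [PySem.Set.mem_ofList]
    exact pv_mem_union m x
  · exact PySem.List.pairwise_lt_pyRange_one _ _
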